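-- pv_equiv track=rewrite | github.com/Mingyang-Li/COMPSCI130 | Lab11.py | get_sum_multiple_list
-- ===== SOURCE A (Python) =====
-- def get_sum_multiple_list(myList, target):
--     if len(myList) == 0:
--         return 0
--     else:
--         if myList[0] % target == 0:
--             return myList[0] + get_sum_multiple_list(myList[1:], target)
--         else:
--             return 0 + get_sum_multiple_list(myList[1:], target)
-- ===== SOURCE B (Python) =====
-- def get_sum_multiple_list(myList, target):
--     total = 0
--     for x in myList:
--         if x % target == 0:
--             total += x
--     return total
-- ===== Notes on version B (the rewrite author's own statement) =====
-- stated objective: faster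
-- what changed: Replaces the list-slicing structural recursion (each call copies the tail) with a single iterative accumulator loop over the list.
import Mathlib
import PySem

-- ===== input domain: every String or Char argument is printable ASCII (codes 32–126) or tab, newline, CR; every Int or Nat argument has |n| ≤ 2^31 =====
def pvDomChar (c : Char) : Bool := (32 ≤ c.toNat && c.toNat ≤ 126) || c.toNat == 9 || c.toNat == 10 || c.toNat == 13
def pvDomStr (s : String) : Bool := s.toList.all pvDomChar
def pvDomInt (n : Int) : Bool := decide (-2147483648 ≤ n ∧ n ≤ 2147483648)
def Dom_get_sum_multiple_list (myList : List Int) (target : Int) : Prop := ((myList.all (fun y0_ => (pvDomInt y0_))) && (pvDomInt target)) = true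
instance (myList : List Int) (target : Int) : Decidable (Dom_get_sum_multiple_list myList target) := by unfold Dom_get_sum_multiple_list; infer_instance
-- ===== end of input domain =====

-- B replaces A's list-slicing recursion by one iterative accumulator loop; Pre_ excludes target = 0 with a nonempty list, where both Pythons raise ZeroDivisionError.


-- ===== PORT A =====
def get_sum_multiple_list (myList : List Int) (target : Int) : Int :=
  match myList with
  | [] => 0
  | x :: rest =>
    if PySem.Int.mod x target = 0 then x + get_sum_multiple_list rest target
    else 0 + get_sum_multiple_list rest target

-- ===== PORT B =====
def get_sum_multiple_list_alt (myList : List Int) (target : Int) : Int :=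
  myList.foldl (fun total x => if PySem.Int.mod x target = 0 then total + x else total) 0

-- ===== PRECONDITION & SPEC =====
-- Pre_ excludes exactly the inputs where Python A raises ZeroDivisionError: target = 0 with a nonempty list (B raises there too).
def Pre_get_sum_multiple_list (myList : List Int) (target : Int) : Prop := (myList.isEmpty || target != 0) = true
instance (myList : List Int) (target : Int) : Decidable (Pre_get_sum_multiple_list myList target) := by unfold Pre_get_sum_multiple_list; infer_instance
def pvWitness_get_sum_multiple_list : List Int × Int := ([6, 4, 9, 0, -3], 3)

def Spec_get_sum_multiple_list (myList : List Int) (target : Int) (out : Int) : Prop := out = get_sum_multiple_list_alt myList target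
instance (myList : List Int) (target : Int) (out : Int) : Decidable (Spec_get_sum_multiple_list myList target out) := by unfold Spec_get_sum_multiple_list; infer_instance

-- ===== CLAIM (what is proved, stated in full; the proofs are below) =====
def Claim_equal_get_sum_multiple_list : Prop := ∀ (myList : List Int) (target : Int), Dom_get_sum_multiple_list myList target → Pre_get_sum_multiple_list myList target → Spec_get_sum_multiple_list myList target (get_sum_multiple_list myList target)

-- ===== LEMMAS AND PROOFS =====
theorem foldl_acc_eq (target : Int) (l : List Int) (acc : Int) :
    l.foldl (fun total x => if PySem.Int.mod x target = 0 then total + x else total) acc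
      = acc + get_sum_multiple_list l target := by
  induction l generalizing acc with
  | nil => simp [get_sum_multiple_list]
  | cons x rest ih =>
    simp only [List.foldl, get_sum_multiple_list]
    split_ifs with h <;> rw [ih] <;> ring

-- ===== VERDICT (by name: the statement is the Claim_ definition above) =====
theorem get_sum_multiple_list_spec : Claim_equal_get_sum_multiple_list := by
  intro myList target _ _
  unfold Spec_get_sum_multiple_list get_sum_multiple_list_alt
  rw [foldl_acc_eq]
  ring
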